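-- pv_equiv track=rewrite | github.com/yxsec/DeepTx | src/llm_analyzer.py | get_consensus_risk_level
-- ===== SOURCE A (Python) =====
-- from typing import List, Dict, Any
--
-- def get_consensus_risk_level(risk_levels: List[str]) -> str:
--     """
--     Determine consensus risk level from multiple model results.
--
--     Args:
--         risk_levels: List of risk levels from different models
--
--     Returns:
--         Consensus risk level
--     """
--     if not risk_levels:
--         return "unknown"
--
--     # Count occurrences
--     counts = {}
--     for level in risk_levels:
--         counts[level] = counts.get(level, 0) + 1
--
--     # Find most common
--     most_common = max(counts, key=counts.get)
--
--     # If unanimous, return that level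
--     if counts[most_common] == len(risk_levels):
--         return most_common
--
--     # If not unanimous, return the most severe level
--     severity_order = {"malicious": 3, "suspicious": 2, "safe": 1}
--     max_severity = max(severity_order.get(level, 0) for level in risk_levels)
--
--     for level, severity in severity_order.items():
--         if severity == max_severity and level in risk_levels:
--             return level
--
--     return most_common
-- ===== SOURCE B (Python) =====
-- def get_consensus_risk_level(risk_levels):
--     if not risk_levels:
--         return "unknown"
--     # Descending severity scan: first recognized tier present wins.
--     # Subsumes both the unanimous-recognized case and the severe-majority case.
--     for tier in ("malicious", "suspicious", "safe"):
--         if tier in risk_levels: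
--             return tier
--     # No recognized tier at all: most common, first-appearance tie-break.
--     counts = {}
--     for level in risk_levels:
--         counts[level] = counts.get(level, 0) + 1
--     return max(counts, key=counts.get)
-- ===== Notes on version B (the rewrite author's own statement) =====
-- stated objective: simpler
-- what changed: Replaced A's count-dict + unanimity check + severity pre-pass + dict-items scan by a single descending scan over the three recognized tiers, keeping the count-then-first-max pass only as a fallback when no recognized tier appears.
import Mathlib
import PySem

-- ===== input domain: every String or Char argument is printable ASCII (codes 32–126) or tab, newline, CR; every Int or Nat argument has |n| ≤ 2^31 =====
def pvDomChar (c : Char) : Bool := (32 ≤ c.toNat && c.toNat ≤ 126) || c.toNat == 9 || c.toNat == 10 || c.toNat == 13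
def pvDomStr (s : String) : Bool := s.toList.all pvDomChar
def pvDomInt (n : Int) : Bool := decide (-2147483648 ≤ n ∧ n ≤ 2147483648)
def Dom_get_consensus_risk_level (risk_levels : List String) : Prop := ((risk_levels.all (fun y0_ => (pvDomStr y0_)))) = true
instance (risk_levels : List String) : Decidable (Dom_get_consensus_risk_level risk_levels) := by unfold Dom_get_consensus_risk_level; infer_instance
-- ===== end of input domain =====

-- B: single descending scan over the recognized tiers with a counting fallback, replacing A's unanimity check and severity pre-pass (simpler).


-- ===== PORT A =====
def get_consensus_risk_level (risk_levels : List String) : String :=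
  if risk_levels = [] then "unknown" else
  let counts : PySem.Dict String Int :=
    risk_levels.foldl (fun d level => d.modify level 0 (· + 1)) PySem.Dict.empty
  match PySem.List.max? counts.keys (fun k => counts.getD k 0) with
  | none => "unknown"   -- unreachable: counts is nonempty here
  | some most_common =>
    if counts.getD most_common 0 = (risk_levels.length : Int) then most_common
    else
      let severity_order : PySem.Dict String Int :=
        PySem.Dict.ofList [("malicious", 3), ("suspicious", 2), ("safe", 1)]
      let max_severity : Int :=
        (PySem.List.max? (risk_levels.map (fun level => severity_order.getD level 0)) (fun x => x)).getD 0
      match severity_order.items.find? (fun p => p.2 == max_severity && risk_levels.contains p.1) with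
      | some p => p.1
      | none => most_common

-- ===== PORT B =====
def get_consensus_risk_level_alt (risk_levels : List String) : String :=
  if risk_levels = [] then "unknown" else
  match ["malicious", "suspicious", "safe"].find? (fun tier => risk_levels.contains tier) with
  | some tier => tier
  | none =>
    let counts : PySem.Dict String Int :=
      risk_levels.foldl (fun d level => d.modify level 0 (· + 1)) PySem.Dict.empty
    (PySem.List.max? counts.keys (fun k => counts.getD k 0)).getD "unknown"

-- ===== PRECONDITION & SPEC =====
def Spec_get_consensus_risk_level (risk_levels : List String) (out : String) : Prop := out = get_consensus_risk_level_alt risk_levels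
instance (risk_levels : List String) (out : String) : Decidable (Spec_get_consensus_risk_level risk_levels out) := by unfold Spec_get_consensus_risk_level; infer_instance

-- ===== CLAIM (what is proved, stated in full; the proofs are below) =====
def Claim_equal_get_consensus_risk_level : Prop := ∀ (risk_levels : List String), Dom_get_consensus_risk_level risk_levels → Spec_get_consensus_risk_level risk_levels (get_consensus_risk_level risk_levels)

-- ===== LEMMAS AND PROOFS =====

-- severity_order.get(level, 0) as a plain function (proof-side helper)
def sevf (s : String) : Int :=
  if s = "malicious" then 3 else if s = "suspicious" then 2 else if s = "safe" then 1 else 0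

theorem sevd_getD (s : String) :
    (PySem.Dict.ofList [("malicious", (3:Int)), ("suspicious", 2), ("safe", 1)]).getD s 0 = sevf s := by
  simp only [PySem.Dict.ofList, PySem.Dict.update, List.foldl, PySem.Dict.getD_insert,
    PySem.Dict.getD_empty, sevf]
  split_ifs <;> simp_all

theorem sevf_le_three (s : String) : sevf s ≤ 3 := by
  unfold sevf; split_ifs <;> omega

theorem maxD_eq (xs : List Int) (M : Int) (h1 : M ∈ xs) (h2 : ∀ y ∈ xs, y ≤ M) :
    (PySem.List.max? xs (fun x => x)).getD 0 = M := by
  cases hmax : PySem.List.max? xs (fun x => x) with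
  | none =>
    rw [(PySem.List.max?_eq_none_iff xs _).1 hmax] at h1
    exact absurd h1 (List.not_mem_nil)
  | some m =>
    have hm := PySem.List.max?_mem hmax
    have h3 := PySem.List.max?_isMax hmax M h1
    have h4 := h2 m hm
    simp only [Option.getD_some]
    omega

-- ===== VERDICT (by name: the statement is the Claim_ definition above) =====

theorem get_consensus_risk_level_spec : Claim_equal_get_consensus_risk_level := by
  intro l _
  unfold Spec_get_consensus_risk_level
  by_cases hl : l = []
  · subst hl; rfl
  simp only [get_consensus_risk_level, get_consensus_risk_level_alt, if_neg hl,
    ← PySem.Dict.counter_eq_foldl, PySem.Dict.keys_counter, PySem.Dict.getD_counter, sevd_getD]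
  have hitems : (PySem.Dict.ofList [("malicious", (3:Int)), ("suspicious", 2), ("safe", 1)]).items
      = [("malicious", 3), ("suspicious", 2), ("safe", 1)] := by decide
  rw [hitems]
  cases hmax : PySem.List.max? (PySem.Set.ofList l) fun k => ((List.count k l : Nat) : Int) with
  | none =>
    exfalso
    have hnil := (PySem.List.max?_eq_none_iff _ _).1 hmax
    cases l with
    | nil => exact hl rfl
    | cons h t =>
      have : h ∈ PySem.Set.ofList (h :: t) := (PySem.Set.mem_ofList _ _).2 (List.mem_cons_self ..)
      rw [hnil] at this
      exact absurd this (List.not_mem_nil)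
  | some m =>
    have hm_mem : m ∈ l := (PySem.Set.mem_ofList _ _).1 (PySem.List.max?_mem hmax)
    have hcnt : ∀ y ∈ l, List.count y l ≤ List.count m l := by
      intro y hy
      have := PySem.List.max?_isMax hmax y ((PySem.Set.mem_ofList _ _).2 hy)
      exact_mod_cast this
    have hc : ∀ t : String, l.contains t = decide (t ∈ l) := by
      intro t
      by_cases h : t ∈ l <;> simp [h]
    simp only [Option.getD_some, hc]
    by_cases hu : ((List.count m l : Nat) : Int) = ((l.length : Nat) : Int)
    · -- unanimous: every element of l equals m
      rw [if_pos hu]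
      have hall : ∀ b ∈ l, m = b := List.count_eq_length.1 (by exact_mod_cast hu)
      have hiff : ∀ t : String, t ∈ l ↔ t = m := fun t =>
        ⟨fun ht => (hall t ht).symm, fun ht => ht ▸ hm_mem⟩
      by_cases h1 : m = "malicious"
      · simp [List.find?, hiff, h1]
      by_cases h2 : m = "suspicious"
      · simp [List.find?, hiff, h2]
      by_cases h3 : m = "safe"
      · simp [List.find?, hiff, h3]
      · simp [List.find?, hiff, h1, h2, h3, eq_comm]
    · -- not unanimous: severity branch
      rw [if_neg hu]
      have hbound : ∀ y ∈ List.map (fun level => sevf level) l, y ≤ 3 := by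
        rintro y hy
        obtain ⟨x, _, rfl⟩ := List.mem_map.1 hy
        exact sevf_le_three x
      by_cases h3 : "malicious" ∈ l
      · have hM : (PySem.List.max? (List.map (fun level => sevf level) l) fun x => x).getD 0 = 3 :=
          maxD_eq _ 3 (List.mem_map.2 ⟨"malicious", h3, by simp [sevf]⟩) hbound
        rw [hM]
        simp [List.find?, h3]
      by_cases h2 : "suspicious" ∈ l
      · have hM : (PySem.List.max? (List.map (fun level => sevf level) l) fun x => x).getD 0 = 2 :=
          maxD_eq _ 2 (List.mem_map.2 ⟨"suspicious", h2, by simp [sevf]⟩) (by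
            rintro y hy
            obtain ⟨x, hx, rfl⟩ := List.mem_map.1 hy
            have hne : x ≠ "malicious" := fun h => h3 (h ▸ hx)
            simp only [sevf]
            split_ifs <;> simp_all)
        rw [hM]
        simp [List.find?, h2, h3]
      by_cases h1 : "safe" ∈ l
      · have hM : (PySem.List.max? (List.map (fun level => sevf level) l) fun x => x).getD 0 = 1 :=
          maxD_eq _ 1 (List.mem_map.2 ⟨"safe", h1, by simp [sevf]⟩) (by
            rintro y hy
            obtain ⟨x, hx, rfl⟩ := List.mem_map.1 hy
            have hne3 : x ≠ "malicious" := fun h => h3 (h ▸ hx)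
            have hne2 : x ≠ "suspicious" := fun h => h2 (h ▸ hx)
            simp only [sevf]
            split_ifs <;> simp_all)
        rw [hM]
        simp [List.find?, h1, h2, h3]
      · -- no recognized tier at all: max severity is 0, both fall back to most_common
        have hM : (PySem.List.max? (List.map (fun level => sevf level) l) fun x => x).getD 0 = 0 := by
          obtain ⟨x, hx⟩ := List.exists_mem_of_ne_nil l hl
          have hzero : ∀ y ∈ l, sevf y = 0 := by
            intro y hy
            have hne3 : y ≠ "malicious" := fun h => h3 (h ▸ hy)
            have hne2 : y ≠ "suspicious" := fun h => h2 (h ▸ hy)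
            have hne1 : y ≠ "safe" := fun h => h1 (h ▸ hy)
            simp [sevf, hne3, hne2, hne1]
          exact maxD_eq _ 0 (List.mem_map.2 ⟨x, hx, hzero x hx⟩) (by
            rintro y hy
            obtain ⟨z, hz, rfl⟩ := List.mem_map.1 hy
            exact le_of_eq (hzero z hz))
        rw [hM]
        simp [List.find?, h1, h2, h3]
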